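-- pv_equiv track=rewrite | github.com/alexwhz-sjtu/dflash_eval | train/data/collect_data_batch.py | _validate_indices
-- ===== SOURCE A (Python) =====
-- from typing import Any, Dict, List, Optional
--
-- def _validate_indices(indices: List[int], dataset_size: int, expected_count: int) -> bool:
--     if not isinstance(indices, list):
--         return False
--     if len(indices) != expected_count:
--         return False
--     if expected_count == 0:
--         return True
--     if not all(isinstance(x, int) for x in indices):
--         return False
--     if min(indices) < 0 or max(indices) >= dataset_size:
--         return False
--     return True
-- ===== SOURCE B (Python) =====
-- # Alternative strategy: sort once, then only the two endpoints of the sorted list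
-- # decide the range check (min = first, max = last). Return value only.
-- def _validate_indices(indices, dataset_size, expected_count):
--     if not isinstance(indices, list):
--         return False
--     if len(indices) != expected_count:
--         return False
--     if expected_count == 0:
--         return True
--     s = sorted(indices)
--     return s[0] >= 0 and s[-1] < dataset_size
-- ===== Notes on version B (the rewrite author's own statement) =====
-- stated objective: alternative
-- what changed: Replaced the per-element scans (all/min/max) with sort-then-endpoints: sort the list once and test only the first element (the minimum) against 0 and the last (the maximum) against dataset_size.
import Mathlib
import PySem

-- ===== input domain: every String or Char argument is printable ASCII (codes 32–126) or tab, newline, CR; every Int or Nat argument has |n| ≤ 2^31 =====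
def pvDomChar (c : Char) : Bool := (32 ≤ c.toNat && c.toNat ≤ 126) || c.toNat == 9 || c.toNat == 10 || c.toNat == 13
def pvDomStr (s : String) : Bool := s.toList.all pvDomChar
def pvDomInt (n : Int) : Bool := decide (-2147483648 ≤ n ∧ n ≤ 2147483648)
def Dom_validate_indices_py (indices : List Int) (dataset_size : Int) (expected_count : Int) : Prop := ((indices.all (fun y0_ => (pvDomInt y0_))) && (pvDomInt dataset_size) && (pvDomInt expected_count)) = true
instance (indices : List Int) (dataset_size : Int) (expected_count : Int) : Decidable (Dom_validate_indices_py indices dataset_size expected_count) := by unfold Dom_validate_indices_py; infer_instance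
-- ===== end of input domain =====

-- B replaces A's min/max scans by sort-then-endpoints (first/last of sorted list); return value only.


-- ===== PORT A =====
-- literal port of A: length guard, zero guard, then the min and max scans
-- (isinstance checks are vacuous under the type convention: indices : List Int, x : Int)
-- the `_, _ => true` branch is unreachable: after the guards the list is nonempty
def validate_indices_py (indices : List Int) (dataset_size : Int) (expected_count : Int) : Bool :=
  if (indices.length : Int) ≠ expected_count then false
  else if expected_count = 0 then true
  else
    match PySem.List.min? indices (fun x => x), PySem.List.max? indices (fun x => x) with
    | some mn, some mx => if mn < 0 || mx ≥ dataset_size then false else true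
    | _, _ => true

-- ===== PORT B =====
-- B: same guards, then sort once and test only the endpoints s[0] and s[-1]
-- the `_, _ => true` branch is unreachable: the sorted list is nonempty after the guards
def validate_indices_py_alt (indices : List Int) (dataset_size : Int) (expected_count : Int) : Bool :=
  if (indices.length : Int) ≠ expected_count then false
  else if expected_count = 0 then true
  else
    let s := PySem.List.sorted indices (fun x => x) false
    match PySem.List.pyGet? s 0 with
    | none => true
    | some a =>
      match PySem.List.pyGet? s (-1) with
      | none => true
      | some b => decide (a ≥ 0) && decide (b < dataset_size)

-- ===== PRECONDITION & SPEC =====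
def Spec_validate_indices_py (indices : List Int) (dataset_size : Int) (expected_count : Int) (out : Bool) : Prop := out = validate_indices_py_alt indices dataset_size expected_count
instance (indices : List Int) (dataset_size : Int) (expected_count : Int) (out : Bool) : Decidable (Spec_validate_indices_py indices dataset_size expected_count out) := by unfold Spec_validate_indices_py; infer_instance

-- ===== CLAIM =====
def Claim_equal_validate_indices_py : Prop := ∀ (indices : List Int) (dataset_size : Int) (expected_count : Int), Dom_validate_indices_py indices dataset_size expected_count → Spec_validate_indices_py indices dataset_size expected_count (validate_indices_py indices dataset_size expected_count)

-- ===== LEMMAS AND PROOFS =====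

-- first element of the (ascending) sorted list is a minimum of the original list
theorem sorted_head_is_min (xs : List Int) (m : Int) (t : List Int)
    (h : PySem.List.sorted xs (fun x => x) false = m :: t) :
    m ∈ xs ∧ ∀ y ∈ xs, m ≤ y := by
  constructor
  · have hm : m ∈ PySem.List.sorted xs (fun x => x) false := by simp [h]
    exact (PySem.List.mem_sorted xs (fun x => x) false m).mp hm
  · exact PySem.List.key_head_sorted_le xs (fun x => x) h

-- s[-1] of the (ascending) sorted list is a maximum of the original list
theorem sorted_last_is_max (xs : List Int) (hne : xs ≠ []) :
    ∃ b, PySem.List.pyGet? (PySem.List.sorted xs (fun x => x) false) (-1) = some b ∧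
      b ∈ xs ∧ ∀ y ∈ xs, y ≤ b := by
  set s := PySem.List.sorted xs (fun x => x) false with hs
  have hlen : s.length = xs.length := by simp [hs, PySem.List.length_sorted]
  have hpos : 0 < s.length := by rw [hlen]; exact List.length_pos_iff.mpr hne
  refine ⟨s[s.length - 1]'(by omega), ?_, ?_, ?_⟩
  · simp only [PySem.List.pyGet?, PySem.List.pyIdx?]
    have h1 : ¬ (0 : Int) ≤ -1 := by decide
    have h2 : -(s.length : Int) ≤ -1 := by omega
    simp only [h1, if_false, h2, if_true]
    have h3 : ((-(-1 : Int)).toNat) = 1 := by decide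
    rw [h3, Option.bind_some]
    exact List.getElem?_eq_getElem _
  · have hmem : s[s.length - 1]'(by omega) ∈ s := List.getElem_mem _
    exact (PySem.List.mem_sorted xs (fun x => x) false _).mp (hs ▸ hmem)
  · intro y hy
    have hy' : y ∈ s := by
      rw [hs]; exact (PySem.List.mem_sorted xs (fun x => x) false y).mpr hy
    obtain ⟨i, hi, hiy⟩ := List.getElem_of_mem hy'
    have hle := PySem.List.sorted_id_getElem_mono xs
      (p := i) (q := s.length - 1) (by omega) (by rw [← hs]; omega)
    rw [← hiy]
    exact hle

-- ===== VERDICT =====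
theorem validate_indices_py_spec : Claim_equal_validate_indices_py := by
  intro indices ds ec _
  unfold Spec_validate_indices_py validate_indices_py validate_indices_py_alt
  by_cases h1 : (indices.length : Int) ≠ ec
  · simp [h1]
  · push Not at h1
    by_cases h2 : ec = 0
    · simp [h1, h2]
    · simp only [h1, ne_eq, not_true_eq_false, if_false, h2]
      have hne : indices ≠ [] := by
        intro h; subst h; simp at h1; omega
      set s := PySem.List.sorted indices (fun x => x) false with hs
      have hslen : s.length = indices.length := by simp [hs, PySem.List.length_sorted]
      have hspos : 0 < s.length := by rw [hslen]; exact List.length_pos_iff.mpr hne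
      obtain ⟨mn, hmn⟩ := Option.ne_none_iff_exists'.mp
        (by simpa [PySem.List.min?_eq_none_iff] using hne :
          PySem.List.min? indices (fun x => x) ≠ none)
      obtain ⟨mx, hmx⟩ := Option.ne_none_iff_exists'.mp
        (by simpa [PySem.List.max?_eq_none_iff] using hne :
          PySem.List.max? indices (fun x => x) ≠ none)
      have hmnMem : mn ∈ indices := PySem.List.min?_mem hmn
      have hmxMem : mx ∈ indices := PySem.List.max?_mem hmx
      have hmnMin : ∀ y ∈ indices, mn ≤ y := fun y hy => PySem.List.min?_isMin hmn y hy
      have hmxMax : ∀ y ∈ indices, y ≤ mx := fun y hy => PySem.List.max?_isMax hmx y hy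
      obtain ⟨m, t, hst⟩ : ∃ m t, s = m :: t := by
        cases hsc : s with
        | nil => rw [hsc] at hspos; simp at hspos
        | cons a b => exact ⟨a, b, rfl⟩
      obtain ⟨hmMem, hmMin⟩ := sorted_head_is_min indices m t (hs ▸ hst)
      obtain ⟨b, hbget, hbMem, hbMax⟩ := sorted_last_is_max indices hne
      rw [← hs] at hbget
      have hget0 : PySem.List.pyGet? s 0 = some m := by
        simp [PySem.List.pyGet?, PySem.List.pyIdx?, hst]
      rw [hmn, hmx, hget0, hbget]
      have hmeq : m = mn := le_antisymm (hmMin mn hmnMem) (hmnMin m hmMem)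
      have hbeq2 : b = mx := le_antisymm (hmxMax b hbMem) (hbMax mx hmxMem)
      subst hmeq hbeq2
      by_cases hc : m < 0 ∨ ds ≤ b
      · have hb : (m < 0 || b ≥ ds) = true := by rcases hc with h | h <;> simp [h]
        simp only [hb, if_true]
        rcases hc with h | h
        · simp [show ¬ m ≥ 0 by omega]
        · simp [show ¬ b < ds by omega]
      · push Not at hc
        have hb : (m < 0 || b ≥ ds) = false := by
          simp only [Bool.or_eq_false_iff, decide_eq_false_iff_not, ge_iff_le, not_lt, not_le]
          omega
        have e1 : decide (m ≥ 0) = true := by simp [ge_iff_le]; omega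
        have e2 : decide (b < ds) = true := by simp; omega
        simp [hb, e1, e2]
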